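-- pv_equiv track=rewrite | github.com/timointhebush/AlgorithmStudy | programmers/카드_짝_맞추기.py | create_final_case
-- ===== SOURCE A (Python) =====
-- from itertools import permutations, product
--
-- def create_final_case(card_case, coords_1, coords_2):
--     num_to_coords = {0: coords_1, 1: coords_2}
--     num_cases = product(range(2), repeat=len(card_case))
--     final_cases = []
--     for case in num_cases:
--         final_case = []
--         for i in range(len(case)):
--             card = card_case[i]
--             coords = num_to_coords[case[i]]
--             final_case.extend(coords[card])
--         final_cases.append(final_case)
--     return final_cases
-- ===== SOURCE B (Python) =====
-- def create_final_case(card_case, coords_1, coords_2):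
--     # Iterative doubling: extend every partial case with this card's coords_1
--     # choice, then its coords_2 choice; last card varies fastest, matching
--     # itertools.product's order.
--     results = [[]]
--     for card in card_case:
--         first = coords_1[card]
--         second = coords_2[card]
--         results = [partial + ext for partial in results for ext in (first, second)]
--     return results
-- ===== Notes on version B (the rewrite author's own statement) =====
-- stated objective: alternative
-- what changed: Replaces itertools.product over index tuples plus an indexed inner loop with a single left-to-right pass that doubles the list of partial cases at each card (each partial extended with the coords_1 choice, then the coords_2 choice), reproducing product's order without ever materializing the bit tuples.
import Mathlib
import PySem

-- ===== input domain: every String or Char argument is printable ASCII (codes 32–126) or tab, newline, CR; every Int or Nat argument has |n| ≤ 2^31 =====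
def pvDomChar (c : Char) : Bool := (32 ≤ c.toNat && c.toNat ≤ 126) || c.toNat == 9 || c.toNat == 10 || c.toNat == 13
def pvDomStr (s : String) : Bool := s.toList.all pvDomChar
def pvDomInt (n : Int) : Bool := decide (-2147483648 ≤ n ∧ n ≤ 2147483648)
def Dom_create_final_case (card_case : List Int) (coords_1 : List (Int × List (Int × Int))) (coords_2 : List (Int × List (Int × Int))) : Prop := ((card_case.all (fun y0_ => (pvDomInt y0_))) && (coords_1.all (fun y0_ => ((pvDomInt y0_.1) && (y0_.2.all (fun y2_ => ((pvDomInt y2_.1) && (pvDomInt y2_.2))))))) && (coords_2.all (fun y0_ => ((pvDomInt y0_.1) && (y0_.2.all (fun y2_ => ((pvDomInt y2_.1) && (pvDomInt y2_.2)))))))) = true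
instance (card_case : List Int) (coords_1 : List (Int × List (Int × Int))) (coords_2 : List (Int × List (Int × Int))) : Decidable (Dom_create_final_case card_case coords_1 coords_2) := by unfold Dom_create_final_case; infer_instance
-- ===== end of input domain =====

-- B replaces the product-of-bit-tuples enumeration by iterative doubling of partial cases; alternative decomposition, same cost.


-- ===== PORT A =====
-- itertools.product(range(2), repeat=n): all bit tuples, first coordinate most significant
def pvProdBits : Nat → List (List Int)
  | 0 => [[]]
  | n + 1 => ([0, 1] : List Int).flatMap (fun b => (pvProdBits n).map (fun rest => b :: rest))

def create_final_case (card_case : List Int) (coords_1 : List (Int × List (Int × Int))) (coords_2 : List (Int × List (Int × Int))) : List (List (Int × Int)) :=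
  -- num_to_coords = {0: coords_1, 1: coords_2}; card = card_case[i]; coords = num_to_coords[case[i]]
  -- (locals inlined; .getD [] stands for Python's KeyError, excluded by Pre_)
  (pvProdBits card_case.length).foldl (fun final_cases case =>
    final_cases ++ [(PySem.List.pyRange 0 (PySem.List.len case) 1).foldl (fun final_case i =>
      final_case ++
        (((((PySem.Dict.ofList [(0, PySem.Dict.ofList coords_1), (1, PySem.Dict.ofList coords_2)]).get?
            (PySem.List.pyGetD case i 0)).getD PySem.Dict.empty).get?
            (PySem.List.pyGetD card_case i 0)).getD [])) []]) []

-- ===== PORT B =====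
def create_final_case_alt (card_case : List Int) (coords_1 : List (Int × List (Int × Int))) (coords_2 : List (Int × List (Int × Int))) : List (List (Int × Int)) :=
  card_case.foldl (fun results card =>
    let first := ((PySem.Dict.ofList coords_1).get? card).getD []    -- coords_1[card]; KeyError excluded by Pre_
    let second := ((PySem.Dict.ofList coords_2).get? card).getD []
    results.flatMap (fun part => ([first, second]).map (fun ext => part ++ ext))) [[]]

-- ===== PRECONDITION & SPEC =====
-- Pre_ excludes exactly the inputs where Python A raises KeyError: some card of card_case missing from coords_1 or coords_2.
def Pre_create_final_case (card_case : List Int) (coords_1 : List (Int × List (Int × Int))) (coords_2 : List (Int × List (Int × Int))) : Prop :=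
  ∀ card ∈ card_case, ((PySem.Dict.ofList coords_1).contains card && (PySem.Dict.ofList coords_2).contains card) = true
instance (card_case : List Int) (coords_1 : List (Int × List (Int × Int))) (coords_2 : List (Int × List (Int × Int))) : Decidable (Pre_create_final_case card_case coords_1 coords_2) := by unfold Pre_create_final_case; infer_instance

def pvWitness_create_final_case : List Int × (List (Int × List (Int × Int))) × (List (Int × List (Int × Int))) :=
  ([0, 1], [(0, [(1, 2)]), (1, [])], [(0, [(3, 4)]), (1, [(5, 6)])])

def Spec_create_final_case (card_case : List Int) (coords_1 : List (Int × List (Int × Int))) (coords_2 : List (Int × List (Int × Int))) (out : List (List (Int × Int))) : Prop := out = create_final_case_alt card_case coords_1 coords_2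
instance (card_case : List Int) (coords_1 : List (Int × List (Int × Int))) (coords_2 : List (Int × List (Int × Int))) (out : List (List (Int × Int))) : Decidable (Spec_create_final_case card_case coords_1 coords_2 out) := by unfold Spec_create_final_case; infer_instance

-- ===== CLAIM (what is proved, stated in full; the proofs are below) =====
def Claim_equal_create_final_case : Prop := ∀ (card_case : List Int) (coords_1 : List (Int × List (Int × Int))) (coords_2 : List (Int × List (Int × Int))), Dom_create_final_case card_case coords_1 coords_2 → Pre_create_final_case card_case coords_1 coords_2 → Spec_create_final_case card_case coords_1 coords_2 (create_final_case card_case coords_1 coords_2)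

-- ===== LEMMAS AND PROOFS =====

-- the value chosen for bit b and card c (b = 0 → coords_1, b = 1 → coords_2; else empty)
def pvLook (d1 d2 : PySem.Dict Int (List (Int × Int))) (b c : Int) : List (Int × Int) :=
  ((((PySem.Dict.ofList [(0, d1), (1, d2)]).get? b).getD PySem.Dict.empty).get? c).getD []

-- common spec: the list of final cases, card-structurally
def pvSpec (d1 d2 : PySem.Dict Int (List (Int × Int))) : List Int → List (List (Int × Int))
  | [] => [[]]
  | c :: cs => ([(d1.get? c).getD [], (d2.get? c).getD []]).flatMap
      (fun x => (pvSpec d1 d2 cs).map (fun t => x ++ t))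

theorem pvProdBits_length {n : Nat} {case : List Int} (h : case ∈ pvProdBits n) : case.length = n := by
  induction n generalizing case with
  | zero => simp [pvProdBits] at h; simp [h]
  | succ m ih =>
    simp only [pvProdBits, List.mem_flatMap, List.mem_map] at h
    obtain ⟨b, hb, rest, hrest, rfl⟩ := h
    simp [ih hrest]

theorem pvB_foldl (d1 d2 : PySem.Dict Int (List (Int × Int))) (cs : List Int)
    (acc : List (List (Int × Int))) :
    cs.foldl (fun results card =>
      results.flatMap (fun part =>
        ([((d1.get? card).getD []), ((d2.get? card).getD [])]).map (fun ext => part ++ ext))) acc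
      = acc.flatMap (fun r => (pvSpec d1 d2 cs).map (fun t => r ++ t)) := by
  induction cs generalizing acc with
  | nil => simp [pvSpec]
  | cons c cs ih =>
    simp only [List.foldl_cons, ih, pvSpec]
    simp [List.flatMap_assoc, List.append_assoc, Function.comp_def]

theorem pvInner_eq (d1 d2 : PySem.Dict Int (List (Int × Int))) (case cards : List Int)
    (hlen : case.length = cards.length) :
    (PySem.List.pyRange 0 (PySem.List.len case) 1).foldl (fun final_case i =>
        final_case ++ pvLook d1 d2 (PySem.List.pyGetD case i 0) (PySem.List.pyGetD cards i 0)) []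
      = (case.zip cards).flatMap (fun p => pvLook d1 d2 p.1 p.2) := by
  have hz : (case.zip cards).length = case.length := by simp [hlen]
  rw [PySem.List.foldl_congr_mem _ _ (fun final_case i =>
      final_case ++ pvLook d1 d2 (PySem.List.pyGetD (case.zip cards) i (0, 0)).1
        (PySem.List.pyGetD (case.zip cards) i (0, 0)).2) [] ?_]
  · rw [show PySem.List.len case = (PySem.List.len (case.zip cards)) by simp [PySem.List.len_eq, hz]]
    rw [PySem.List.foldl_pyRange_zero_pyGetD (case.zip cards) (0, 0)
      (fun acc p => acc ++ pvLook d1 d2 p.1 p.2) []]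
    rw [PySem.List.foldl_append_eq_flatMap]
    simp
  · intro acc i hi
    rw [PySem.List.mem_pyRange_one] at hi
    have h0 := hi.1
    have h1 : i < (case.length : Int) := by
      have := hi.2; rwa [show PySem.List.len case = (case.length : Int) by simp [PySem.List.len_eq]] at this
    simp only [PySem.List.pyGetD_eq_getElem case 0 h0 h1,
        PySem.List.pyGetD_eq_getElem cards 0 h0 (by rw [← hlen]; exact h1),
        PySem.List.pyGetD_eq_getElem (case.zip cards) (0, 0) h0 (by rw [hz]; exact h1)]
    simp

theorem pvLook_zero (d1 d2 : PySem.Dict Int (List (Int × Int))) (c : Int) :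
    pvLook d1 d2 0 c = (d1.get? c).getD [] := rfl

theorem pvLook_one (d1 d2 : PySem.Dict Int (List (Int × Int))) (c : Int) :
    pvLook d1 d2 1 c = (d2.get? c).getD [] := rfl

theorem pvA_map (d1 d2 : PySem.Dict Int (List (Int × Int))) (cards : List Int) :
    (pvProdBits cards.length).map (fun case =>
        (case.zip cards).flatMap (fun p => pvLook d1 d2 p.1 p.2))
      = pvSpec d1 d2 cards := by
  induction cards with
  | nil => simp [pvProdBits, pvSpec]
  | cons c cs ih =>
    show (([0, 1] : List Int).flatMap (fun b => (pvProdBits cs.length).map (fun rest => b :: rest))).map _ = _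
    rw [List.map_flatMap]
    simp only [List.map_map, List.flatMap_cons, List.flatMap_nil, List.append_nil]
    have hstep : ∀ b : Int,
        (pvProdBits cs.length).map ((fun case => (case.zip (c :: cs)).flatMap
            (fun p => pvLook d1 d2 p.1 p.2)) ∘ (fun rest => b :: rest))
          = (pvSpec d1 d2 cs).map (fun t => pvLook d1 d2 b c ++ t) := by
      intro b
      rw [← ih, List.map_map]
      apply List.map_congr_left
      intro rest _
      simp [Function.comp, List.zip_cons_cons]
    rw [hstep 0, hstep 1]
    simp [pvSpec, pvLook_zero, pvLook_one]

theorem create_final_case_eq (card_case : List Int) (coords_1 coords_2 : List (Int × List (Int × Int))) :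
    create_final_case card_case coords_1 coords_2
      = pvSpec (PySem.Dict.ofList coords_1) (PySem.Dict.ofList coords_2) card_case := by
  unfold create_final_case
  rw [PySem.List.foldl_append_singleton_eq_map, List.nil_append]
  rw [show (fun case => (PySem.List.pyRange 0 (PySem.List.len case) 1).foldl (fun final_case i =>
      final_case ++
        (((((PySem.Dict.ofList [(0, PySem.Dict.ofList coords_1), (1, PySem.Dict.ofList coords_2)]).get?
            (PySem.List.pyGetD case i 0)).getD PySem.Dict.empty).get?
            (PySem.List.pyGetD card_case i 0)).getD [])) [])
    = (fun case => (PySem.List.pyRange 0 (PySem.List.len case) 1).foldl (fun final_case i =>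
      final_case ++ pvLook (PySem.Dict.ofList coords_1) (PySem.Dict.ofList coords_2)
        (PySem.List.pyGetD case i 0) (PySem.List.pyGetD card_case i 0)) []) from rfl]
  rw [List.map_congr_left (fun case hc => pvInner_eq (PySem.Dict.ofList coords_1)
    (PySem.Dict.ofList coords_2) case card_case (pvProdBits_length hc))]
  exact pvA_map _ _ card_case

theorem create_final_case_alt_eq (card_case : List Int) (coords_1 coords_2 : List (Int × List (Int × Int))) :
    create_final_case_alt card_case coords_1 coords_2
      = pvSpec (PySem.Dict.ofList coords_1) (PySem.Dict.ofList coords_2) card_case := by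
  unfold create_final_case_alt
  rw [pvB_foldl]
  simp

-- ===== VERDICT (by name: the statement is the Claim_ definition above) =====
theorem create_final_case_spec : Claim_equal_create_final_case := by
  intro card_case coords_1 coords_2 _ _
  unfold Spec_create_final_case
  rw [create_final_case_eq, create_final_case_alt_eq]
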